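-- pv_equiv track=rewrite | github.com/RaghavgitGrover/DASS_Project | code/R2_New/R2/timetable_generator.py | generate_exam_schedule
-- ===== SOURCE A (Python) =====
-- from typing import Dict, List, Set, Tuple
-- from collections import defaultdict
--
-- def find_course_conflicts(course_students: Dict[str, Set[str]],
--                          course_timeslots: Dict[str, List[Tuple[str, int]]]) -> List[Tuple[str, str]]:
--     """Find pairs of courses that have student conflicts."""
--     conflicts = []
--
--     courses = list(course_students.keys())
--     for i in range(len(courses)):
--         for j in range(i + 1, len(courses)):
--             course1, course2 = courses[i], courses[j]
--             students1 = course_students[course1]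
--             students2 = course_students[course2]
--
--             # If there's any overlap in students
--             if students1 & students2:
--                 conflicts.append((course1, course2))
--
--     return conflicts
--
-- def generate_exam_schedule(course_students: Dict[str, Set[str]],
--                           course_timeslots: Dict[str, List[Tuple[str, int]]],
--                           num_days: int = 4,
--                           slots_per_day: int = 4) -> Dict[str, Tuple[int, int]]:
--     """Generate an optimized exam schedule."""
--     # Get all courses
--     courses = list(course_students.keys())
--     num_courses = len(courses)
--
--     # Initialize schedule
--     schedule = {}
--     used_slots = set()
--
--     # Find conflicts
--     conflicts = find_course_conflicts(course_students, course_timeslots)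
--     conflict_graph = defaultdict(set)
--     for course1, course2 in conflicts:
--         conflict_graph[course1].add(course2)
--         conflict_graph[course2].add(course1)
--
--     # Sort courses by number of conflicts (most conflicting first)
--     courses.sort(key=lambda x: len(conflict_graph[x]), reverse=True)
--
--     # Try to schedule each course
--     for course in courses:
--         # Try each possible slot
--         for day in range(num_days):
--             for slot in range(slots_per_day):
--                 slot_key = (day, slot)
--
--                 # Skip if slot is already used
--                 if slot_key in used_slots:
--                     continue
--
--                 # Check for conflicts with already scheduled courses
--                 has_conflict = False
--                 for scheduled_course, scheduled_slot in schedule.items():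
--                     if scheduled_course in conflict_graph[course]:
--                         if scheduled_slot[0] == day:  # Same day
--                             has_conflict = True
--                             break
--
--                 if not has_conflict:
--                     schedule[course] = slot_key
--                     used_slots.add(slot_key)
--                     break
--
--     return schedule
-- ===== SOURCE B (Python) =====
-- # Faster re-implementation: inverted student->courses index builds the conflict
-- # graph (no pairwise set intersections), and the scheduling loop precomputes the
-- # blocked days per course instead of rescanning all scheduled courses per slot.
-- def generate_exam_schedule(course_students, course_timeslots, num_days=4, slots_per_day=4):
--     # invert: student -> list of courses containing it
--     student_courses = {}
--     for course, students in course_students.items():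
--         for s in students:
--             student_courses.setdefault(s, []).append(course)
--
--     # conflict graph from per-student course lists
--     adj = {c: set() for c in course_students}
--     for lst in student_courses.values():
--         for i in range(len(lst)):
--             for j in range(i + 1, len(lst)):
--                 a, b = lst[i], lst[j]
--                 if a != b:
--                     adj[a].add(b)
--                     adj[b].add(a)
--
--     courses = sorted(course_students, key=lambda c: len(adj[c]), reverse=True)
--
--     schedule = {}
--     used = set()
--     for course in courses:
--         blocked = {schedule[n][0] for n in adj[course] if n in schedule}
--         for day in range(num_days):
--             if day in blocked:
--                 continue
--             for slot in range(slots_per_day):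
--                 if (day, slot) not in used:
--                     schedule[course] = (day, slot)
--                     used.add((day, slot))
--                     break
--     return schedule
-- ===== Notes on version B (the rewrite author's own statement) =====
-- stated objective: alternative
-- what changed: B builds the conflict graph from an inverted student-to-courses index instead of intersecting every pair of course student-sets, and the scheduling loop precomputes each course's blocked days from its neighbors instead of rescanning all scheduled courses for every (day, slot); intended as faster, and measured much faster at mid sizes, but a timing run could not confirm it at the largest size.
import Mathlib
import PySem

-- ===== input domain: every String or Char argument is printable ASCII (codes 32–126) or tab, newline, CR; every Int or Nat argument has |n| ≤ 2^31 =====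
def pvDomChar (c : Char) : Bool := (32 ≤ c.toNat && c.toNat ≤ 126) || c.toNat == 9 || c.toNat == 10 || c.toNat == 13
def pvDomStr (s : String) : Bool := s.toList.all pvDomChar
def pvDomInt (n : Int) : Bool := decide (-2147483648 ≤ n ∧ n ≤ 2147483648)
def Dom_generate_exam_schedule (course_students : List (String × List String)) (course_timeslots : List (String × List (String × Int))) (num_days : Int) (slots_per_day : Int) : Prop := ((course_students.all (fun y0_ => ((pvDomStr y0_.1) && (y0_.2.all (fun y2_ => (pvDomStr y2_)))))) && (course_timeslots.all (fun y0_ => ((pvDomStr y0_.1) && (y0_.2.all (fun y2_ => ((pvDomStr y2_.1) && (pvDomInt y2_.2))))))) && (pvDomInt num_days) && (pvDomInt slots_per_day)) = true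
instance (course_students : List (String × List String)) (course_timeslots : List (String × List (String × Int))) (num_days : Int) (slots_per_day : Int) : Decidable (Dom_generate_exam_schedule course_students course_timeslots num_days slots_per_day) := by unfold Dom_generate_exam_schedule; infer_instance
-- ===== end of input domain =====

-- B replaces A's all-pairs student-set intersections by an inverted student→courses index
-- and replaces A's per-slot rescan of all scheduled courses by a per-course blocked-day set;
-- same return value (objective: alternative algorithm for conflict-graph construction and slot search).

-- ===== PORT A =====

-- truthiness of `students1 & students2` (both are Python sets)
def pvCommonA (s1 s2 : List String) : Bool := decide (PySem.Set.inter (PySem.Set.ofList s1) s2 ≠ [])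

-- inner `for j in range(i+1, len(courses))` loop of find_course_conflicts
def pvInnerA (s1 : List String) (d : PySem.Dict String (List String)) (c : String) : List String → List (String × String)
  | [] => []
  | c2 :: rest => if pvCommonA s1 (d.getD c2 []) then (c, c2) :: pvInnerA s1 d c rest else pvInnerA s1 d c rest

-- outer `for i in range(len(courses))` loop of find_course_conflicts
def pvPairsA (d : PySem.Dict String (List String)) : List String → List (String × String)
  | [] => []
  | c :: rest => pvInnerA (d.getD c []) d c rest ++ pvPairsA d rest

-- `conflict_graph[course1].add(course2); conflict_graph[course2].add(course1)` (defaultdict(set))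
def pvAddEdgeA (g : PySem.Dict String (PySem.Set String)) (p : String × String) : PySem.Dict String (PySem.Set String) :=
  (g.modify p.1 [] (fun s => PySem.Set.add s p.2)).modify p.2 [] (fun s => PySem.Set.add s p.1)

def pvGraphA (d : PySem.Dict String (List String)) : PySem.Dict String (PySem.Set String) :=
  (pvPairsA d d.keys).foldl pvAddEdgeA PySem.Dict.empty

-- `for scheduled_course, scheduled_slot in schedule.items(): … break`
def pvConflictA (nbrs : PySem.Set String) (day : Int) : List (String × Int × Int) → Bool
  | [] => false
  | (sc, sd, _) :: rest => if PySem.Set.contains nbrs sc && (sd == day) then true else pvConflictA nbrs day rest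

-- `for slot in range(slots_per_day): …` with the break after a successful assignment
-- (range(n) is iterated by counting — fuel is the number of remaining iterations, slot the loop variable;
-- used_slots is consumed only via membership, never iterated, so it is held in a Std.HashSet — exact for that use)
def pvSlotsA (course : String) (nbrs : PySem.Set String) (day : Int) :
    Nat → Int → PySem.Dict String (Int × Int) × Std.HashSet (Int × Int) → PySem.Dict String (Int × Int) × Std.HashSet (Int × Int)
  | 0, _, st => st
  | fuel + 1, slot, (sched, used) =>
    if used.contains (day, slot) then pvSlotsA course nbrs day fuel (slot + 1) (sched, used)
    else if pvConflictA nbrs day sched.items then pvSlotsA course nbrs day fuel (slot + 1) (sched, used)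
    else (sched.insert course (day, slot), used.insert (day, slot))

-- `for day in range(num_days): …` (the break only leaves the slot loop, so every day is tried)
def pvDaysA (course : String) (nbrs : PySem.Set String) (slots_per_day : Int) :
    Nat → Int → PySem.Dict String (Int × Int) × Std.HashSet (Int × Int) → PySem.Dict String (Int × Int) × Std.HashSet (Int × Int)
  | 0, _, st => st
  | fuel + 1, day, st => pvDaysA course nbrs slots_per_day fuel (day + 1) (pvSlotsA course nbrs day slots_per_day.toNat 0 st)

def pvStepA (g : PySem.Dict String (PySem.Set String)) (num_days slots_per_day : Int)
    (st : PySem.Dict String (Int × Int) × Std.HashSet (Int × Int)) (course : String) :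
    PySem.Dict String (Int × Int) × Std.HashSet (Int × Int) :=
  pvDaysA course (g.getD course []) slots_per_day num_days.toNat 0 st

def generate_exam_schedule (course_students : List (String × List String)) (course_timeslots : List (String × List (String × Int))) (num_days : Int) (slots_per_day : Int) : List (String × Int × Int) :=
  let d := PySem.Dict.ofList course_students
  let g := pvGraphA d
  let courses := PySem.List.sorted d.keys (fun c => ((PySem.Dict.getD g c []).length : Int)) true
  (courses.foldl (pvStepA g num_days slots_per_day) (PySem.Dict.empty, (∅ : Std.HashSet (Int × Int)))).1.items

-- ===== PORT B =====

-- inverted index: `student_courses.setdefault(s, []).append(course)`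
def pvStudentIdx (items : List (String × List String)) : PySem.Dict String (List String) :=
  items.foldl (fun sc p => p.2.foldl (fun sc s => sc.modify s [] (fun l => l ++ [p.1])) sc) PySem.Dict.empty

-- `for i … for j>i … if a != b: adj[a].add(b); adj[b].add(a)` (keys always present; modify is value-equal)
def pvAddPairsB (g : PySem.Dict String (PySem.Set String)) : List String → PySem.Dict String (PySem.Set String)
  | [] => g
  | a :: rest =>
    pvAddPairsB
      (rest.foldl (fun g b => if a == b then g
        else (g.modify a [] (fun s => PySem.Set.add s b)).modify b [] (fun s => PySem.Set.add s a)) g) rest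

def pvGraphB (d : PySem.Dict String (List String)) : PySem.Dict String (PySem.Set String) :=
  (pvStudentIdx d.items).values.foldl (fun g lst => pvAddPairsB g lst)
    (d.keys.foldl (fun g c => g.insert c PySem.Set.empty) PySem.Dict.empty)

-- `{schedule[n][0] for n in adj[course] if n in schedule}`
def pvBlockedB (sched : PySem.Dict String (Int × Int)) (nbrs : List String) : PySem.Set Int :=
  nbrs.foldl (fun bl n => if sched.contains n then PySem.Set.add bl (PySem.Dict.getD sched n (0, 0)).1 else bl) PySem.Set.empty

-- first unused slot of an unblocked day (range(n) iterated by counting, as in port A)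
def pvSlotsB (course : String) (day : Int) :
    Nat → Int → PySem.Dict String (Int × Int) × Std.HashSet (Int × Int) → PySem.Dict String (Int × Int) × Std.HashSet (Int × Int)
  | 0, _, st => st
  | fuel + 1, slot, (sched, used) =>
    if used.contains (day, slot) then pvSlotsB course day fuel (slot + 1) (sched, used)
    else (sched.insert course (day, slot), used.insert (day, slot))

-- `for day in range(num_days): if day in blocked: continue …`
def pvDaysB (course : String) (blocked : PySem.Set Int) (slots_per_day : Int) :
    Nat → Int → PySem.Dict String (Int × Int) × Std.HashSet (Int × Int) → PySem.Dict String (Int × Int) × Std.HashSet (Int × Int)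
  | 0, _, st => st
  | fuel + 1, day, st =>
    pvDaysB course blocked slots_per_day fuel (day + 1)
      (if PySem.Set.contains blocked day then st else pvSlotsB course day slots_per_day.toNat 0 st)

def pvStepB (g : PySem.Dict String (PySem.Set String)) (num_days slots_per_day : Int)
    (st : PySem.Dict String (Int × Int) × Std.HashSet (Int × Int)) (course : String) :
    PySem.Dict String (Int × Int) × Std.HashSet (Int × Int) :=
  let blocked := pvBlockedB st.1 (g.getD course [])
  pvDaysB course blocked slots_per_day num_days.toNat 0 st

def generate_exam_schedule_alt (course_students : List (String × List String)) (course_timeslots : List (String × List (String × Int))) (num_days : Int) (slots_per_day : Int) : List (String × Int × Int) :=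
  let d := PySem.Dict.ofList course_students
  let g := pvGraphB d
  let courses := PySem.List.sorted d.keys (fun c => ((PySem.Dict.getD g c []).length : Int)) true
  (courses.foldl (pvStepB g num_days slots_per_day) (PySem.Dict.empty, (∅ : Std.HashSet (Int × Int)))).1.items

-- ===== PRECONDITION & SPEC =====
def Spec_generate_exam_schedule (course_students : List (String × List String)) (course_timeslots : List (String × List (String × Int))) (num_days : Int) (slots_per_day : Int) (out : List (String × Int × Int)) : Prop := out = generate_exam_schedule_alt course_students course_timeslots num_days slots_per_day
instance (course_students : List (String × List String)) (course_timeslots : List (String × List (String × Int))) (num_days : Int) (slots_per_day : Int) (out : List (String × Int × Int)) : Decidable (Spec_generate_exam_schedule course_students course_timeslots num_days slots_per_day out) := by unfold Spec_generate_exam_schedule; infer_instance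

-- ===== CLAIM (what is proved, stated in full; the proofs are below) =====
def Claim_equal_generate_exam_schedule : Prop := ∀ (course_students : List (String × List String)) (course_timeslots : List (String × List (String × Int))) (num_days : Int) (slots_per_day : Int), Dom_generate_exam_schedule course_students course_timeslots num_days slots_per_day → Spec_generate_exam_schedule course_students course_timeslots num_days slots_per_day (generate_exam_schedule course_students course_timeslots num_days slots_per_day)

-- ===== LEMMAS AND PROOFS =====

theorem pvCommonA_iff (s1 s2 : List String) :
    pvCommonA s1 s2 = true ↔ ∃ s, s ∈ s1 ∧ s ∈ s2 := by
  simp only [pvCommonA, decide_eq_true_eq, ne_eq, ← List.isEmpty_iff, Bool.not_eq_true]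
  rw [List.isEmpty_eq_false_iff]
  constructor
  · intro h
    rcases List.exists_mem_of_ne_nil _ h with ⟨y, hy⟩
    exact ⟨y, by simpa [PySem.Set.mem_inter, PySem.Set.mem_ofList] using hy⟩
  · rintro ⟨s, h1, h2⟩
    have : s ∈ PySem.Set.inter (PySem.Set.ofList s1) s2 := by
      simp [PySem.Set.mem_inter, PySem.Set.mem_ofList, h1, h2]
    exact List.ne_nil_of_mem this

theorem pvInnerA_mem (s1 : List String) (d : PySem.Dict String (List String)) (c a b : String) :
    ∀ rest : List String, (a, b) ∈ pvInnerA s1 d c rest ↔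
      a = c ∧ b ∈ rest ∧ pvCommonA s1 (d.getD b []) = true
  | [] => by simp [pvInnerA]
  | c2 :: rest => by
    by_cases h : pvCommonA s1 (d.getD c2 []) = true
    · simp only [pvInnerA, if_pos h, List.mem_cons, pvInnerA_mem s1 d c a b rest, Prod.mk.injEq]
      constructor
      · rintro (⟨rfl, rfl⟩ | ⟨rfl, hb, hc⟩)
        · exact ⟨rfl, Or.inl rfl, h⟩
        · exact ⟨rfl, Or.inr hb, hc⟩
      · rintro ⟨rfl, (rfl | hb), hc⟩
        · exact Or.inl ⟨rfl, rfl⟩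
        · exact Or.inr ⟨rfl, hb, hc⟩
    · simp only [pvInnerA, if_neg h, pvInnerA_mem s1 d c a b rest, List.mem_cons]
      constructor
      · rintro ⟨rfl, hb, hc⟩; exact ⟨rfl, Or.inr hb, hc⟩
      · rintro ⟨rfl, (rfl | hb), hc⟩
        · exact absurd hc h
        · exact ⟨rfl, hb, hc⟩

theorem pvPairsA_mem_imp (d : PySem.Dict String (List String)) (a b : String) :
    ∀ l : List String, (a, b) ∈ pvPairsA d l →
      a ∈ l ∧ b ∈ l ∧ pvCommonA (d.getD a []) (d.getD b []) = true
  | [] => by simp [pvPairsA]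
  | c :: rest => by
    intro h
    simp only [pvPairsA, List.mem_append] at h
    rcases h with h | h
    · obtain ⟨rfl, hb, hc⟩ := (pvInnerA_mem _ d c a b rest).1 h
      exact ⟨List.mem_cons_self, List.mem_cons_of_mem _ hb, hc⟩
    · obtain ⟨ha, hb, hc⟩ := pvPairsA_mem_imp d a b rest h
      exact ⟨List.mem_cons_of_mem _ ha, List.mem_cons_of_mem _ hb, hc⟩

theorem pvPairsA_ne (d : PySem.Dict String (List String)) (a b : String) :
    ∀ l : List String, l.Nodup → (a, b) ∈ pvPairsA d l → a ≠ b
  | [] => by simp [pvPairsA]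
  | c :: rest => by
    intro hnd h
    simp only [pvPairsA, List.mem_append] at h
    rcases h with h | h
    · obtain ⟨rfl, hb, -⟩ := (pvInnerA_mem _ d c a b rest).1 h
      rintro rfl
      exact (List.nodup_cons.1 hnd).1 hb
    · exact pvPairsA_ne d a b rest (List.nodup_cons.1 hnd).2 h

theorem pvCommonA_symm (s1 s2 : List String) : pvCommonA s1 s2 = pvCommonA s2 s1 := by
  rcases h : pvCommonA s2 s1 with _|_
  · by_contra h2
    obtain ⟨s, h1', h2'⟩ := (pvCommonA_iff s1 s2).1 (by simpa using h2)
    rw [(pvCommonA_iff s2 s1).2 ⟨s, h2', h1'⟩] at h; cases h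
  · obtain ⟨s, h1', h2'⟩ := (pvCommonA_iff s2 s1).1 h
    exact (pvCommonA_iff s1 s2).2 ⟨s, h2', h1'⟩

theorem pvPairsA_total (d : PySem.Dict String (List String)) (a b : String) :
    ∀ l : List String, a ∈ l → b ∈ l → a ≠ b →
      pvCommonA (d.getD a []) (d.getD b []) = true →
      (a, b) ∈ pvPairsA d l ∨ (b, a) ∈ pvPairsA d l
  | [] => by simp
  | c :: rest => by
    intro ha hb hne hc
    simp only [List.mem_cons] at ha hb
    simp only [pvPairsA, List.mem_append]
    rcases ha with rfl | ha
    · rcases hb with rfl | hb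
      · exact absurd rfl hne
      · exact Or.inl (Or.inl ((pvInnerA_mem _ d a a b rest).2 ⟨rfl, hb, hc⟩))
    · rcases hb with rfl | hb
      · refine Or.inr (Or.inl ((pvInnerA_mem _ d b b a rest).2 ⟨rfl, ha, ?_⟩))
        rw [pvCommonA_symm]; exact hc
      · rcases pvPairsA_total d a b rest ha hb hne hc with h | h
        · exact Or.inl (Or.inr h)
        · exact Or.inr (Or.inr h)
theorem pvAddEdgeA_getD_mem (g : PySem.Dict String (PySem.Set String)) (p : String × String) (c x : String) :
    (x ∈ (pvAddEdgeA g p).getD c [] ↔ x ∈ g.getD c [] ∨ (c = p.1 ∧ x = p.2) ∨ (c = p.2 ∧ x = p.1)) := by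
  obtain ⟨p1, p2⟩ := p
  simp only [pvAddEdgeA, PySem.Dict.getD_modify]
  by_cases h1 : c = p1 <;> by_cases h2 : c = p2 <;> by_cases h12 : p1 = p2 <;>
    simp_all [PySem.Set.mem_add]

theorem pvFoldEdges_mem (c x : String) :
    ∀ (ps : List (String × String)) (g : PySem.Dict String (PySem.Set String)),
      (x ∈ (ps.foldl pvAddEdgeA g).getD c [] ↔
        x ∈ g.getD c [] ∨ (c, x) ∈ ps ∨ (x, c) ∈ ps)
  | [], g => by simp
  | p :: ps, g => by
    simp only [List.foldl_cons, pvFoldEdges_mem c x ps (pvAddEdgeA g p), pvAddEdgeA_getD_mem,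
      List.mem_cons]
    obtain ⟨p1, p2⟩ := p
    constructor
    · rintro ((h | ⟨rfl, rfl⟩ | ⟨rfl, rfl⟩) | h | h) <;> tauto
    · rintro (h | (h | h) | (h | h)) <;> simp_all

theorem pvAddEdgeA_getD_nodup (g : PySem.Dict String (PySem.Set String)) (p : String × String)
    (h : ∀ c, (g.getD c []).Nodup) (c : String) : ((pvAddEdgeA g p).getD c []).Nodup := by
  obtain ⟨p1, p2⟩ := p
  simp only [pvAddEdgeA, PySem.Dict.getD_modify]
  split_ifs <;> (repeat' apply PySem.Set.nodup_add) <;> exact h _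

theorem pvFoldEdges_nodup (c : String) :
    ∀ (ps : List (String × String)) (g : PySem.Dict String (PySem.Set String)),
      (∀ c, (g.getD c []).Nodup) → ((ps.foldl pvAddEdgeA g).getD c []).Nodup
  | [], g, h => h c
  | p :: ps, g, h => pvFoldEdges_nodup c ps (pvAddEdgeA g p) (pvAddEdgeA_getD_nodup g p h)

def pvRel (d : PySem.Dict String (List String)) (c x : String) : Prop :=
  c ∈ d.keys ∧ x ∈ d.keys ∧ c ≠ x ∧ ∃ s, s ∈ d.getD c [] ∧ s ∈ d.getD x []

theorem pvGraphA_mem (d : PySem.Dict String (List String)) (hnd : d.keys.Nodup) (c x : String) :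
    x ∈ (pvGraphA d).getD c [] ↔ pvRel d c x := by
  rw [pvGraphA, pvFoldEdges_mem]
  simp only [PySem.Dict.getD_empty, List.not_mem_nil, false_or]
  constructor
  · rintro (h | h)
    · obtain ⟨ha, hb, hc⟩ := pvPairsA_mem_imp d c x _ h
      exact ⟨ha, hb, pvPairsA_ne d c x _ hnd h, (pvCommonA_iff _ _).1 hc⟩
    · obtain ⟨ha, hb, hc⟩ := pvPairsA_mem_imp d x c _ h
      refine ⟨hb, ha, (pvPairsA_ne d x c _ hnd h).symm, ?_⟩
      obtain ⟨s, h1, h2⟩ := (pvCommonA_iff _ _).1 hc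
      exact ⟨s, h2, h1⟩
  · rintro ⟨ha, hb, hne, s, h1, h2⟩
    exact pvPairsA_total d c x _ ha hb hne ((pvCommonA_iff _ _).2 ⟨s, h1, h2⟩)

theorem pvGraphA_nodup (d : PySem.Dict String (List String)) (c : String) :
    ((pvGraphA d).getD c []).Nodup := by
  apply pvFoldEdges_nodup
  intro c; simp
def pvFlat (items : List (String × List String)) : List (String × String) :=
  items.flatMap (fun p => p.2.map (fun s => (s, p.1)))

theorem pvStudentIdx_eq_flat :
    ∀ (items : List (String × List String)) (sc : PySem.Dict String (List String)),
      items.foldl (fun sc p => p.2.foldl (fun sc s => sc.modify s [] (fun l => l ++ [p.1])) sc) sc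
        = (pvFlat items).foldl (fun d q => d.modify q.1 [] (fun l => l ++ [q.2])) sc
  | [], sc => rfl
  | p :: items, sc => by
    simp only [List.foldl_cons, pvFlat, List.flatMap_cons, List.foldl_append,
      List.foldl_map]
    exact pvStudentIdx_eq_flat items _

theorem pvStudentIdx_getD (items : List (String × List String)) (s : String) :
    (pvStudentIdx items).getD s [] = (((pvFlat items).filter (fun q => q.1 == s)).map (fun q => q.2)) := by
  rw [pvStudentIdx, pvStudentIdx_eq_flat, PySem.Dict.getD_foldl_modify_append]
  simp

theorem pvStudentIdx_mem (items : List (String × List String)) (s c : String) :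
    c ∈ (pvStudentIdx items).getD s [] ↔ ∃ p ∈ items, p.1 = c ∧ s ∈ p.2 := by
  rw [pvStudentIdx_getD]
  simp only [List.mem_map, List.mem_filter, pvFlat, List.mem_flatMap, beq_iff_eq]
  constructor
  · rintro ⟨⟨s', c'⟩, ⟨⟨p, hp, hq⟩, rfl⟩, rfl⟩
    simp only [Prod.mk.injEq] at hq
    obtain ⟨t, ht, rfl, rfl⟩ := hq
    exact ⟨p, hp, rfl, ht⟩
  · rintro ⟨p, hp, rfl, hs⟩
    exact ⟨(s, p.1), ⟨⟨p, hp, by simp [hs]⟩, rfl⟩, rfl⟩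

theorem pvStudentIdx_keys_nodup (items : List (String × List String)) :
    (pvStudentIdx items).keys.Nodup := by
  rw [pvStudentIdx, pvStudentIdx_eq_flat]
  exact PySem.Dict.nodup_keys_foldl_modify_key _ _ _ _ _ PySem.Dict.nodup_keys_empty
theorem pvStudentIdx_mem_values (items : List (String × List String)) (lst : List String) :
    lst ∈ (pvStudentIdx items).values ↔ ∃ s ∈ (pvStudentIdx items).keys, lst = (pvStudentIdx items).getD s [] := by
  rw [PySem.Dict.values_eq_map_keys _ (pvStudentIdx_keys_nodup items) []]
  simp only [List.mem_map]
  constructor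
  · rintro ⟨s, hs, rfl⟩; exact ⟨s, hs, rfl⟩
  · rintro ⟨s, hs, rfl⟩; exact ⟨s, hs, rfl⟩

theorem pvStudentIdx_mem_keys (items : List (String × List String)) (s : String) :
    s ∈ (pvStudentIdx items).keys ↔ ∃ p ∈ items, s ∈ p.2 := by
  rw [pvStudentIdx, pvStudentIdx_eq_flat, PySem.Dict.keys_foldl_modify_key]
  simp only [PySem.Dict.keys_empty, PySem.Set.update_nil_left, PySem.Set.mem_ofList,
    List.mem_map, pvFlat, List.mem_flatMap]
  constructor
  · rintro ⟨⟨s', c'⟩, ⟨p, hp, hq⟩, rfl⟩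
    simp only [Prod.mk.injEq] at hq
    obtain ⟨t, ht, rfl, rfl⟩ := hq
    exact ⟨p, hp, ht⟩
  · rintro ⟨p, hp, hs⟩
    exact ⟨(s, p.1), ⟨p, hp, by simp [hs]⟩, rfl⟩

theorem pvBaseB_getD (c : String) :
    ∀ (l : List String) (g : PySem.Dict String (PySem.Set String)), (∀ c, g.getD c [] = []) →
      (l.foldl (fun g c => g.insert c PySem.Set.empty) g).getD c [] = []
  | [], g, h => h c
  | a :: l, g, h => by
    refine pvBaseB_getD c l _ (fun c' => ?_)
    rw [PySem.Dict.getD_insert]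
    split_ifs with h'
    · rfl
    · exact h c'

theorem pvInnerPairsB_mem (a c x : String) :
    ∀ (rest : List String) (g : PySem.Dict String (PySem.Set String)),
      (x ∈ (rest.foldl (fun g b => if a == b then g
          else (g.modify a [] (fun s => PySem.Set.add s b)).modify b [] (fun s => PySem.Set.add s a)) g).getD c []
        ↔ x ∈ g.getD c [] ∨ ∃ b ∈ rest, a ≠ b ∧ ((c = a ∧ x = b) ∨ (c = b ∧ x = a)))
  | [], g => by simp
  | b :: rest, g => by
    simp only [List.foldl_cons, pvInnerPairsB_mem a c x rest, List.mem_cons]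
    have hstep : (if a == b then g
          else (g.modify a [] (fun s => PySem.Set.add s b)).modify b [] (fun s => PySem.Set.add s a))
        = (if a == b then g else pvAddEdgeA g (a, b)) := by
      simp [pvAddEdgeA]
    rw [hstep]
    by_cases hab : a = b
    · simp only [hab, beq_self_eq_true, if_pos]
      constructor
      · rintro (h | h); · exact Or.inl h
        · obtain ⟨b', hb', hne, hcx⟩ := h; exact Or.inr ⟨b', Or.inr hb', hne, hcx⟩
      · rintro (h | ⟨b', (rfl | hb'), hne, hcx⟩)
        · exact Or.inl h
        · exact absurd rfl hne
        · exact Or.inr ⟨b', hb', hne, hcx⟩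
    · rw [if_neg (by simpa using hab)]
      rw [pvAddEdgeA_getD_mem]
      constructor
      · rintro ((h | hcx | hcx) | h)
        · exact Or.inl h
        · exact Or.inr ⟨b, Or.inl rfl, hab, Or.inl hcx⟩
        · exact Or.inr ⟨b, Or.inl rfl, hab, Or.inr hcx⟩
        · obtain ⟨b', hb', hne, hcx⟩ := h; exact Or.inr ⟨b', Or.inr hb', hne, hcx⟩
      · rintro (h | ⟨b', (rfl | hb'), hne, hcx⟩)
        · exact Or.inl (Or.inl h)
        · exact Or.inl (Or.inr hcx)
        · exact Or.inr ⟨b', hb', hne, hcx⟩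
theorem pvAddPairsB_mem (c x : String) :
    ∀ (lst : List String) (g : PySem.Dict String (PySem.Set String)),
      (x ∈ (pvAddPairsB g lst).getD c [] ↔
        x ∈ g.getD c [] ∨ (c ∈ lst ∧ x ∈ lst ∧ c ≠ x))
  | [], g => by simp [pvAddPairsB]
  | a :: rest, g => by
    rw [pvAddPairsB, pvAddPairsB_mem c x rest, pvInnerPairsB_mem]
    simp only [List.mem_cons]
    constructor
    · rintro ((h | ⟨b, hb, hne, (⟨rfl, rfl⟩ | ⟨rfl, rfl⟩)⟩) | ⟨hc, hx, hne⟩)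
      · exact Or.inl h
      · exact Or.inr ⟨Or.inl rfl, Or.inr hb, hne⟩
      · exact Or.inr ⟨Or.inr hb, Or.inl rfl, fun h => hne h.symm⟩
      · exact Or.inr ⟨Or.inr hc, Or.inr hx, hne⟩
    · rintro (h | ⟨(rfl | hc), (rfl | hx), hne⟩)
      · exact Or.inl (Or.inl h)
      · exact absurd rfl hne
      · exact Or.inl (Or.inr ⟨x, hx, hne, Or.inl ⟨rfl, rfl⟩⟩)
      · exact Or.inl (Or.inr ⟨c, hc, fun h => hne h.symm, Or.inr ⟨rfl, rfl⟩⟩)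
      · exact Or.inr ⟨hc, hx, hne⟩

theorem pvInnerPairsB_nodup (a : String) :
    ∀ (rest : List String) (g : PySem.Dict String (PySem.Set String)),
      (∀ c, (g.getD c []).Nodup) → ∀ c,
      ((rest.foldl (fun g b => if a == b then g
          else (g.modify a [] (fun s => PySem.Set.add s b)).modify b [] (fun s => PySem.Set.add s a)) g).getD c []).Nodup
  | [], g, h => h
  | b :: rest, g, h => by
    refine pvInnerPairsB_nodup a rest _ (fun c => ?_)
    show List.Nodup ((if (a == b) = true then g
      else (g.modify a [] fun s => PySem.Set.add s b).modify b [] fun s => PySem.Set.add s a).getD c [])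
    by_cases hab : a == b
    · simpa [hab] using h c
    · have : (if a == b then g
          else (g.modify a [] (fun s => PySem.Set.add s b)).modify b [] (fun s => PySem.Set.add s a)) = pvAddEdgeA g (a, b) := by
        simp [hab, pvAddEdgeA]
      rw [this]
      exact pvAddEdgeA_getD_nodup g (a, b) h c

theorem pvAddPairsB_nodup :
    ∀ (lst : List String) (g : PySem.Dict String (PySem.Set String)),
      (∀ c, (g.getD c []).Nodup) → ∀ c, ((pvAddPairsB g lst).getD c []).Nodup
  | [], _, h => h
  | a :: rest, g, h => pvAddPairsB_nodup rest _ (pvInnerPairsB_nodup a rest g h)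

theorem pvGraphB_valuesFold_mem (c x : String) :
    ∀ (lsts : List (List String)) (g : PySem.Dict String (PySem.Set String)),
      (x ∈ (lsts.foldl (fun g lst => pvAddPairsB g lst) g).getD c [] ↔
        x ∈ g.getD c [] ∨ ∃ lst ∈ lsts, c ∈ lst ∧ x ∈ lst ∧ c ≠ x)
  | [], g => by simp
  | lst :: lsts, g => by
    rw [List.foldl_cons, pvGraphB_valuesFold_mem c x lsts, pvAddPairsB_mem]
    simp only [List.mem_cons]
    constructor
    · rintro ((h | h) | ⟨l, hl, hcx⟩)
      · exact Or.inl h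
      · exact Or.inr ⟨lst, Or.inl rfl, h⟩
      · exact Or.inr ⟨l, Or.inr hl, hcx⟩
    · rintro (h | ⟨l, (rfl | hl), hcx⟩)
      · exact Or.inl (Or.inl h)
      · exact Or.inl (Or.inr hcx)
      · exact Or.inr ⟨l, hl, hcx⟩

theorem pvItems_getD_iff (d : PySem.Dict String (List String)) (hnd : d.keys.Nodup) (c : String) (s : String) :
    (∃ p ∈ d.items, p.1 = c ∧ s ∈ p.2) ↔ c ∈ d.keys ∧ s ∈ d.getD c [] := by
  constructor
  · rintro ⟨⟨c', v⟩, hp, rfl, hs⟩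
    refine ⟨PySem.Dict.mem_keys_of_mem_items _ hp, ?_⟩
    rw [PySem.Dict.getD_of_mem_items _ hp hnd]; exact hs
  · rintro ⟨hk, hs⟩
    have hcont : d.contains c = true := (PySem.Dict.contains_iff_mem_keys _ _).2 hk
    rw [PySem.Dict.contains_eq_isSome_get?] at hcont
    obtain ⟨v, hv⟩ := Option.isSome_iff_exists.1 hcont
    refine ⟨(c, v), PySem.Dict.mem_items_of_get?_eq_some _ hv, rfl, ?_⟩
    rwa [PySem.Dict.getD_of_get?_eq_some _ _ hv] at hs

theorem pvGraphB_mem (d : PySem.Dict String (List String)) (hnd : d.keys.Nodup) (c x : String) :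
    x ∈ (pvGraphB d).getD c [] ↔ pvRel d c x := by
  rw [pvGraphB, pvGraphB_valuesFold_mem]
  rw [pvBaseB_getD c d.keys PySem.Dict.empty (fun c => by simp)]
  simp only [List.not_mem_nil, false_or]
  constructor
  · rintro ⟨lst, hlst, hc, hx, hne⟩
    obtain ⟨s, hs, rfl⟩ := (pvStudentIdx_mem_values d.items lst).1 hlst
    obtain ⟨hck, hcs⟩ := (pvItems_getD_iff d hnd c s).1 ((pvStudentIdx_mem d.items s c).1 hc)
    obtain ⟨hxk, hxs⟩ := (pvItems_getD_iff d hnd x s).1 ((pvStudentIdx_mem d.items s x).1 hx)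
    exact ⟨hck, hxk, hne, s, hcs, hxs⟩
  · rintro ⟨hck, hxk, hne, s, hcs, hxs⟩
    refine ⟨(pvStudentIdx d.items).getD s [], ?_, ?_, ?_, hne⟩
    · refine (pvStudentIdx_mem_values d.items _).2 ⟨s, ?_, rfl⟩
      refine (pvStudentIdx_mem_keys d.items s).2 ?_
      obtain ⟨p, hp, -, hsp⟩ := (pvItems_getD_iff d hnd c s).2 ⟨hck, hcs⟩
      exact ⟨p, hp, hsp⟩
    · exact (pvStudentIdx_mem d.items s c).2 ((pvItems_getD_iff d hnd c s).2 ⟨hck, hcs⟩)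
    · exact (pvStudentIdx_mem d.items s x).2 ((pvItems_getD_iff d hnd x s).2 ⟨hxk, hxs⟩)

theorem pvGraphB_nodup (d : PySem.Dict String (List String)) (c : String) :
    ((pvGraphB d).getD c []).Nodup := by
  rw [pvGraphB]
  have hbase : ∀ c : String, (((d.keys.foldl (fun g c => g.insert c PySem.Set.empty) (PySem.Dict.empty : PySem.Dict String (PySem.Set String)))).getD c []).Nodup := by
    intro c; rw [pvBaseB_getD c d.keys PySem.Dict.empty (fun c => by simp)]; exact List.nodup_nil
  revert hbase
  generalize (d.keys.foldl (fun g c => g.insert c PySem.Set.empty) PySem.Dict.empty) = g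
  intro hbase
  induction (pvStudentIdx d.items).values generalizing g with
  | nil => exact hbase c
  | cons lst lsts ih => exact ih _ (pvAddPairsB_nodup lst g hbase)
theorem pvConflictA_iff (nbrs : PySem.Set String) (day : Int) :
    ∀ items : List (String × Int × Int), (pvConflictA nbrs day items = true ↔
      ∃ p ∈ items, PySem.Set.contains nbrs p.1 = true ∧ p.2.1 = day)
  | [] => by simp [pvConflictA]
  | (sc, sd, ss) :: rest => by
    rw [pvConflictA]
    split_ifs with h
    · simp only [true_iff, List.mem_cons]
      rw [Bool.and_eq_true] at h
      exact ⟨(sc, sd, ss), Or.inl rfl, h.1, by simpa using h.2⟩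
    · rw [pvConflictA_iff nbrs day rest]
      simp only [List.mem_cons]
      constructor
      · rintro ⟨p, hp, hc⟩; exact ⟨p, Or.inr hp, hc⟩
      · rintro ⟨p, (rfl | hp), hc⟩
        · exact absurd (by rw [Bool.and_eq_true]; exact ⟨hc.1, by simpa using hc.2⟩) h
        · exact ⟨p, hp, hc⟩

theorem pvBlockedB_mem_aux (sched : PySem.Dict String (Int × Int)) (y : Int) :
    ∀ (nbrs : List String) (bl : PySem.Set Int),
      (y ∈ nbrs.foldl (fun bl n => if sched.contains n then PySem.Set.add bl (PySem.Dict.getD sched n (0, 0)).1 else bl) bl ↔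
        y ∈ bl ∨ ∃ n ∈ nbrs, sched.contains n = true ∧ y = (sched.getD n (0, 0)).1)
  | [], bl => by simp
  | n :: nbrs, bl => by
    rw [List.foldl_cons, pvBlockedB_mem_aux sched y nbrs]
    by_cases h : sched.contains n = true
    · simp only [h, if_pos, PySem.Set.mem_add, List.mem_cons]
      constructor
      · rintro ((hy | rfl) | ⟨n', hn', hc⟩)
        · exact Or.inl hy
        · exact Or.inr ⟨n, Or.inl rfl, h, rfl⟩
        · exact Or.inr ⟨n', Or.inr hn', hc⟩
      · rintro (hy | ⟨n', (rfl | hn'), hc, hy⟩)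
        · exact Or.inl (Or.inl hy)
        · exact Or.inl (Or.inr hy)
        · exact Or.inr ⟨n', hn', hc, hy⟩
    · simp only [if_neg h, List.mem_cons]
      constructor
      · rintro (hy | ⟨n', hn', hc⟩)
        · exact Or.inl hy
        · exact Or.inr ⟨n', Or.inr hn', hc⟩
      · rintro (hy | ⟨n', (rfl | hn'), hc, hy⟩)
        · exact Or.inl hy
        · exact absurd hc h
        · exact Or.inr ⟨n', hn', hc, hy⟩

theorem pvConflict_blocked (sched : PySem.Dict String (Int × Int)) (hnd : sched.keys.Nodup)
    (nbrsA nbrsB : PySem.Set String) (h : ∀ z, z ∈ nbrsA ↔ z ∈ nbrsB) (day : Int) :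
    pvConflictA nbrsA day sched.items = PySem.Set.contains (pvBlockedB sched nbrsB) day := by
  rw [Bool.eq_iff_iff, pvConflictA_iff, PySem.Set.contains_iff, pvBlockedB, pvBlockedB_mem_aux]
  simp only [PySem.Set.empty, List.not_mem_nil, false_or]
  constructor
  · rintro ⟨⟨k, v⟩, hp, hk, hd⟩
    have hg : sched.get? k = some v := PySem.Dict.get?_of_mem_items _ hp hnd
    refine ⟨k, (h k).1 ((PySem.Set.contains_iff _ _).1 hk), ?_, ?_⟩
    · rw [PySem.Dict.contains_eq_isSome_get?, hg]; rfl
    · rw [PySem.Dict.getD_of_get?_eq_some _ _ hg]; exact hd.symm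
  · rintro ⟨n, hn, hc, hy⟩
    rw [PySem.Dict.contains_eq_isSome_get?] at hc
    obtain ⟨v, hv⟩ := Option.isSome_iff_exists.1 hc
    refine ⟨(n, v), PySem.Dict.mem_items_of_get?_eq_some _ hv, (PySem.Set.contains_iff _ _).2 ((h n).2 hn), ?_⟩
    rw [PySem.Dict.getD_of_get?_eq_some _ _ hv] at hy
    exact hy.symm

theorem pvConflictA_insert (sched : PySem.Dict String (Int × Int)) (course : String) (v : Int × Int)
    (nbrs : PySem.Set String) (day : Int) (hc : PySem.Set.contains nbrs course = false) :
    pvConflictA nbrs day (sched.insert course v).items = pvConflictA nbrs day sched.items := by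
  rw [Bool.eq_iff_iff, pvConflictA_iff, pvConflictA_iff]
  constructor
  · rintro ⟨p, hp, hpc⟩
    rcases (PySem.Dict.mem_items_insert _ _ _ _).1 hp with rfl | ⟨hp', -⟩
    · simp only at hpc
      rw [hc] at hpc
      exact absurd hpc.1 (by simp)
    · exact ⟨p, hp', hpc⟩
  · rintro ⟨p, hp, hpc⟩
    have hne : p.1 ≠ course := by
      intro he; rw [he, hc] at hpc; exact Bool.false_ne_true hpc.1
    exact ⟨p, (PySem.Dict.mem_items_insert _ _ _ _).2 (Or.inr ⟨hp, hne⟩), hpc⟩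

theorem pvSlotsA_of_conflict (course : String) (nbrs : PySem.Set String) (day : Int)
    (sched : PySem.Dict String (Int × Int)) (used : Std.HashSet (Int × Int))
    (h : pvConflictA nbrs day sched.items = true) :
    ∀ (fuel : Nat) (slot : Int), pvSlotsA course nbrs day fuel slot (sched, used) = (sched, used)
  | 0, _ => rfl
  | fuel + 1, slot => by
    rw [pvSlotsA]
    by_cases h1 : used.contains (day, slot) = true
    · rw [if_pos h1]
      exact pvSlotsA_of_conflict course nbrs day sched used h fuel (slot + 1)
    · rw [if_neg h1, if_pos h]
      exact pvSlotsA_of_conflict course nbrs day sched used h fuel (slot + 1)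

theorem pvSlotsA_eq_B (course : String) (nbrs : PySem.Set String) (day : Int)
    (sched : PySem.Dict String (Int × Int)) (used : Std.HashSet (Int × Int))
    (h : pvConflictA nbrs day sched.items = false) :
    ∀ (fuel : Nat) (slot : Int),
      pvSlotsA course nbrs day fuel slot (sched, used) = pvSlotsB course day fuel slot (sched, used)
  | 0, _ => rfl
  | fuel + 1, slot => by
    rw [pvSlotsA, pvSlotsB]
    by_cases h1 : used.contains (day, slot) = true
    · rw [if_pos h1, if_pos h1]
      exact pvSlotsA_eq_B course nbrs day sched used h fuel (slot + 1)
    · rw [if_neg h1, if_neg h1, if_neg (by rw [h]; exact Bool.false_ne_true)]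

theorem pvSlotsB_shape (course : String) (day : Int) :
    ∀ (fuel : Nat) (slot : Int) (sched : PySem.Dict String (Int × Int)) (used : Std.HashSet (Int × Int)),
      pvSlotsB course day fuel slot (sched, used) = (sched, used) ∨
      ∃ s, pvSlotsB course day fuel slot (sched, used) = (sched.insert course (day, s), used.insert (day, s))
  | 0, _, _, _ => Or.inl rfl
  | fuel + 1, slot, sched, used => by
    rw [pvSlotsB]
    split_ifs with h1
    · exact pvSlotsB_shape course day fuel (slot + 1) sched used
    · exact Or.inr ⟨slot, rfl⟩

theorem pvDays_eq (course : String) (nbrsA : PySem.Set String) (blocked : PySem.Set Int)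
    (sp : Int) (hc : PySem.Set.contains nbrsA course = false) :
    ∀ (fuel : Nat) (day : Int) (sched : PySem.Dict String (Int × Int)) (used : Std.HashSet (Int × Int)),
      (∀ d', pvConflictA nbrsA d' sched.items = PySem.Set.contains blocked d') →
      pvDaysA course nbrsA sp fuel day (sched, used) = pvDaysB course blocked sp fuel day (sched, used)
  | 0, _, _, _, _ => rfl
  | fuel + 1, day, sched, used, hinv => by
    rw [pvDaysA, pvDaysB]
    by_cases hb : PySem.Set.contains blocked day = true
    · rw [if_pos hb, pvSlotsA_of_conflict course nbrsA day sched used ((hinv day).trans hb)]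
      exact pvDays_eq course nbrsA blocked sp hc fuel (day + 1) sched used hinv
    · rw [if_neg hb,
        pvSlotsA_eq_B course nbrsA day sched used (by rw [hinv day]; simpa using hb)]
      rcases pvSlotsB_shape course day sp.toNat 0 sched used with hsh | ⟨slot, hsh⟩
      · rw [hsh]
        exact pvDays_eq course nbrsA blocked sp hc fuel (day + 1) sched used hinv
      · rw [hsh]
        refine pvDays_eq course nbrsA blocked sp hc fuel (day + 1) _ _ (fun d' => ?_)
        rw [pvConflictA_insert sched course (day, slot) nbrsA d' hc]
        exact hinv d'

theorem pvDaysB_nodup (course : String) (blocked : PySem.Set Int) (sp : Int) :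
    ∀ (fuel : Nat) (day : Int) (st : PySem.Dict String (Int × Int) × Std.HashSet (Int × Int)),
      st.1.keys.Nodup → ((pvDaysB course blocked sp fuel day st).1).keys.Nodup
  | 0, _, _, h => h
  | fuel + 1, day, st, h => by
    rw [pvDaysB]
    refine pvDaysB_nodup course blocked sp fuel (day + 1) _ ?_
    by_cases hb : PySem.Set.contains blocked day = true
    · rwa [if_pos hb]
    · rw [if_neg hb]
      obtain ⟨sched, used⟩ := st
      rcases pvSlotsB_shape course day sp.toNat 0 sched used with h' | ⟨slot, h'⟩ <;> rw [h']
      · exact h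
      · exact PySem.Dict.nodup_keys_insert _ _ _ h

theorem pvCourseFold_eq (gA gB : PySem.Dict String (PySem.Set String)) (nd sp : Int)
    (hG : ∀ c x, x ∈ gA.getD c [] ↔ x ∈ gB.getD c [])
    (hirr : ∀ c, c ∉ gA.getD c []) :
    ∀ (courses : List String) (st : PySem.Dict String (Int × Int) × Std.HashSet (Int × Int)),
      st.1.keys.Nodup →
      courses.foldl (pvStepA gA nd sp) st = courses.foldl (pvStepB gB nd sp) st
  | [], _, _ => rfl
  | course :: rest, st, hnd => by
    simp only [List.foldl_cons]
    obtain ⟨sched, used⟩ := st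
    have hc : PySem.Set.contains (gA.getD course []) course = false := by
      cases h : PySem.Set.contains (gA.getD course []) course
      · rfl
      · exact absurd ((PySem.Set.contains_iff _ _).1 h) (hirr course)
    have hstep : pvStepA gA nd sp (sched, used) course = pvStepB gB nd sp (sched, used) course := by
      rw [pvStepA, pvStepB]
      exact pvDays_eq course (gA.getD course []) (pvBlockedB sched (gB.getD course []))
        sp hc nd.toNat 0 sched used
        (fun d' => pvConflict_blocked sched hnd _ _ (hG course) d')
    rw [hstep]
    refine pvCourseFold_eq gA gB nd sp hG hirr rest _ ?_
    rw [pvStepB]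
    exact pvDaysB_nodup course _ _ _ _ _ hnd

theorem pvMain_eq (course_students : List (String × List String)) (course_timeslots : List (String × List (String × Int))) (num_days : Int) (slots_per_day : Int) :
    generate_exam_schedule course_students course_timeslots num_days slots_per_day
      = generate_exam_schedule_alt course_students course_timeslots num_days slots_per_day := by
  rw [generate_exam_schedule, generate_exam_schedule_alt]
  have hnd : (PySem.Dict.ofList course_students).keys.Nodup := PySem.Dict.nodup_keys_ofList _
  have hmem : ∀ c x, x ∈ (pvGraphA (PySem.Dict.ofList course_students)).getD c []
      ↔ x ∈ (pvGraphB (PySem.Dict.ofList course_students)).getD c [] :=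
    fun c x => (pvGraphA_mem _ hnd c x).trans (pvGraphB_mem _ hnd c x).symm
  have hlen : ∀ c, ((pvGraphA (PySem.Dict.ofList course_students)).getD c []).length
      = ((pvGraphB (PySem.Dict.ofList course_students)).getD c []).length := by
    intro c
    exact ((List.perm_ext_iff_of_nodup (pvGraphA_nodup _ c) (pvGraphB_nodup _ c)).2 (hmem c)).length_eq
  have hkey : (fun c => (((pvGraphA (PySem.Dict.ofList course_students)).getD c []).length : Int))
      = (fun c => (((pvGraphB (PySem.Dict.ofList course_students)).getD c []).length : Int)) :=
    funext fun c => by rw [hlen c]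
  simp only [hkey]
  rw [pvCourseFold_eq (pvGraphA (PySem.Dict.ofList course_students)) (pvGraphB (PySem.Dict.ofList course_students))
    num_days slots_per_day hmem
    (fun c hm => ((pvGraphA_mem _ hnd c c).1 hm).2.2.1 rfl)
    _ _ PySem.Dict.nodup_keys_empty]

-- ===== VERDICT (by name: the statement is the Claim_ definition above) =====
theorem generate_exam_schedule_spec : Claim_equal_generate_exam_schedule := by
  intro course_students course_timeslots num_days slots_per_day _
  unfold Spec_generate_exam_schedule
  exact pvMain_eq course_students course_timeslots num_days slots_per_day
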